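-- pv_equiv track=rewrite | github.com/Stjoo0925/CodingTest | Python3/프로그래머스/0/181864. 문자열 바꿔서 찾기/문자열 바꿔서 찾기.py | solution
-- ===== SOURCE A (Python) =====
-- def solution(myString, pat):
--     result = list(myString)
--     arr = []
--
--     for i in result:
--         if i == "A":
--             i = "B"
--         else:
--             i = "A"
--         arr.append(i)
--
--     answer = "".join(arr)
--
--     if pat in answer:
--         return 1
--     else:
--         return 0
-- ===== SOURCE B (Python) =====
-- def solution(myString, pat):
--     n, m = len(myString), len(pat)
--     i = 0
--     while i <= n:                      # try pat against the A-swapped view of each suffix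
--         j = 0
--         while j < m and i + j < n:
--             c = pat[j]
--             t = myString[i + j]
--             if c == 'B':
--                 if t != 'A':
--                     break
--             elif c == 'A':
--                 if t == 'A':
--                     break
--             else:
--                 break
--             j += 1
--         if j == m:
--             return 1
--         i += 1
--     return 0
-- ===== Notes on version B (the rewrite author's own statement) =====
-- stated objective: alternative
-- what changed: Instead of building the whole swapped string and using substring membership, B never materialises a transformed string: it slides over the suffixes of myString and matches pat character-by-character against the swap predicate ('B' needs 'A', 'A' needs non-'A', anything else never matches).
import Mathlib
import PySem

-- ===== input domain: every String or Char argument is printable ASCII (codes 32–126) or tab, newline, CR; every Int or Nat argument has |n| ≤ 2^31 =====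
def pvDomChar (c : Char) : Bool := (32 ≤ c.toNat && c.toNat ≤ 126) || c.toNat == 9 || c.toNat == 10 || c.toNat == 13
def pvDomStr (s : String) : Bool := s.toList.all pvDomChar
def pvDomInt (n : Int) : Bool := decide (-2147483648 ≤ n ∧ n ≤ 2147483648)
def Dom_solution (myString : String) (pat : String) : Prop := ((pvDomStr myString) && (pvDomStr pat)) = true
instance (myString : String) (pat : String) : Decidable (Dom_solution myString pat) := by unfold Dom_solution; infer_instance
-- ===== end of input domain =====

-- B changes the decomposition: no transformed copy of myString is built; pat is matched directly
-- against the swap predicate at each suffix. Same cost, no speed claim.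

-- ===== PORT A =====
-- A: swap every char of myString ('A'→'B', anything else→'A') into arr, join, then 'pat in answer'.
def solution (myString : String) (pat : String) : Int :=
  let result := myString.toList
  let arr := result.foldl (fun acc i => acc ++ [if i = 'A' then 'B' else 'A']) []
  let answer := arr          -- "".join of single-char strings, kept as List Char
  if PySem.Chars.isIn pat.toList answer then 1 else 0

-- ===== PORT B =====
-- inner while of Source B (index j): does pat match the A-swapped view at the start of the
-- remaining suffix?  Advancing j by 1 = consuming one char of each list; branch order as in Source B.
def bMatch : List Char → List Char → Bool
  | [], _ => true
  | _ :: _, [] => false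
  | c :: p', t :: s' =>
      if c = 'B' then (if t ≠ 'A' then false else bMatch p' s')
      else if c = 'A' then (if t = 'A' then false else bMatch p' s')
      else false

-- outer while of Source B (index i, i = chars already consumed): try each suffix, incl. the empty one
def bScan (p : List Char) : List Char → Int
  | [] => if bMatch p [] then 1 else 0
  | t :: s' => if bMatch p (t :: s') then 1 else bScan p s'

def solution_alt (myString : String) (pat : String) : Int :=
  bScan pat.toList myString.toList

-- ===== PRECONDITION & SPEC =====
def Spec_solution (myString : String) (pat : String) (out : Int) : Prop := out = solution_alt myString pat
instance (myString : String) (pat : String) (out : Int) : Decidable (Spec_solution myString pat out) := by unfold Spec_solution; infer_instance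

-- ===== CLAIM (what is proved, stated in full; the proofs are below) =====
def Claim_equal_solution : Prop := ∀ (myString : String) (pat : String), Dom_solution myString pat → Spec_solution myString pat (solution myString pat)

-- ===== LEMMAS AND PROOFS =====

-- A's per-character swap
def pvSwap (t : Char) : Char := if t = 'A' then 'B' else 'A'

theorem bMatch_iff_prefix (p s : List Char) :
    bMatch p s = true ↔ p <+: s.map pvSwap := by
  induction p generalizing s with
  | nil => simp [bMatch]
  | cons c p' ih =>
    cases s with
    | nil => simp [bMatch]
    | cons t s' =>
      simp only [bMatch, List.map, List.cons_prefix_cons]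
      by_cases hc : c = 'B' <;> by_cases ht : t = 'A' <;>
        simp [hc, ht, pvSwap, ih]

theorem bScan_eq (p s : List Char) :
    bScan p s = if PySem.Chars.isIn p (s.map pvSwap) then 1 else 0 := by
  induction s with
  | nil =>
    by_cases h : bMatch p [] = true
    · have hp : p = [] := by simpa using (bMatch_iff_prefix p []).mp h
      subst hp; simp [bScan, bMatch]
    · have hp : p ≠ [] := by
        intro hp; exact h ((bMatch_iff_prefix p []).mpr (by simp [hp]))
      have : ¬ PySem.Chars.isIn p ([] : List Char) = true := by
        rw [PySem.Chars.isIn_iff_infix]; simp [hp]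
      simp [bScan, h, this]
  | cons t s' ih =>
    by_cases h : bMatch p (t :: s') = true
    · have hpre : p <+: (t :: s').map pvSwap := (bMatch_iff_prefix _ _).mp h
      have hin : PySem.Chars.isIn p ((t :: s').map pvSwap) = true := by
        rw [PySem.Chars.isIn_iff_infix]; exact hpre.isInfix
      simp only [List.map] at hin
      simp [bScan, h, hin]
    · have hnpre : ¬ p <+: (t :: s').map pvSwap := fun hp => h ((bMatch_iff_prefix _ _).mpr hp)
      have hiff : PySem.Chars.isIn p ((t :: s').map pvSwap) = PySem.Chars.isIn p (s'.map pvSwap) := by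
        rw [Bool.eq_iff_iff, PySem.Chars.isIn_iff_infix, PySem.Chars.isIn_iff_infix]
        simp only [List.map] at hnpre ⊢
        rw [List.infix_cons_iff]
        tauto
      simp only [List.map] at hiff
      simp [bScan, h, ih, hiff]

theorem foldl_swap (l : List Char) :
    l.foldl (fun acc i => acc ++ [if i = 'A' then 'B' else 'A']) [] = l.map pvSwap := by
  simp only [pysem]
  induction l with
  | nil => simp
  | cons x xs ih => simp [pvSwap]

-- ===== VERDICT (by name: the statement is the Claim_ definition above) =====
theorem solution_spec : Claim_equal_solution := by
  intro myString pat _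
  show (if PySem.Chars.isIn pat.toList
          (myString.toList.foldl (fun acc i => acc ++ [if i = 'A' then 'B' else 'A']) []) then (1:Int) else 0)
      = bScan pat.toList myString.toList
  rw [foldl_swap, bScan_eq]
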